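-- pv_equiv track=rewrite | github.com/Sosohy/algorithm_study | 프로그래머스/2/138476. 귤 고르기/귤 고르기.py | solution
-- ===== SOURCE A (Python) =====
-- def solution(k, tangerine):
--     answer = 0
--     typeDic = {}
--
--     for i in tangerine:
--         if(i not in typeDic):
--             typeDic[i] = 0
--         typeDic[i] += 1
--
--     values = list(typeDic.values())
--     values.sort(reverse=True)
--
--     for i in values:
--         if(k <= 0):
--             return answer
--
--         answer += 1
--         k -= i
--
--     return answer
-- ===== SOURCE B (Python) =====
-- def solution(k, tangerine):
--     # counting-sort on frequencies (bounded by len(tangerine)) instead of comparison sort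
--     freq = {}
--     for t in tangerine:
--         freq[t] = freq.get(t, 0) + 1
--     bucket = {}
--     for c in freq.values():
--         bucket[c] = bucket.get(c, 0) + 1
--     answer = 0
--     for c in range(len(tangerine), 0, -1):
--         for _ in range(bucket.get(c, 0)):
--             if k <= 0:
--                 return answer
--             answer += 1
--             k -= c
--     return answer
-- ===== Notes on version B (the rewrite author's own statement) =====
-- stated objective: alternative
-- what changed: Replaces the comparison sort of the frequency list by a counting-sort: a bucket table of frequency-of-frequencies is built once and scanned from the largest possible frequency (len(tangerine)) down, consuming the greedy loop bucket by bucket.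
import Mathlib
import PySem

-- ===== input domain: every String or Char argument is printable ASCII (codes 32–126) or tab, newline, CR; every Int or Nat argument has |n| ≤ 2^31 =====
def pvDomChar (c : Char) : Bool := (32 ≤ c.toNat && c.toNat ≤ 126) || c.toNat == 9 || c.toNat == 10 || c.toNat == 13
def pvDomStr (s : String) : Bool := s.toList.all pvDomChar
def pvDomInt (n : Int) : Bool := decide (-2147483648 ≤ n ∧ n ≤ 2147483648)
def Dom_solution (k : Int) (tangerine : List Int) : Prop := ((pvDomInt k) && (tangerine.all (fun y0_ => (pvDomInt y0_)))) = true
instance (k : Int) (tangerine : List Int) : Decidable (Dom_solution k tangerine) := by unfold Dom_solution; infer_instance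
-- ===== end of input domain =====

-- B replaces A's comparison sort of the frequency list by a counting-sort over a
-- frequency-of-frequencies table scanned from len(tangerine) down (alternative algorithm, O(n)).

-- ===== PORT A =====
-- the final 'for i in values: if k <= 0: return answer; answer += 1; k -= i' loop of A
def solLoopA : List Int → Int → Int → Int
  | [], _, answer => answer
  | i :: rest, k, answer =>
    if k ≤ 0 then answer else solLoopA rest (k - i) (answer + 1)

def solution (k : Int) (tangerine : List Int) : Int :=
  let answer : Int := 0
  let typeDic : PySem.Dict Int Int :=
    tangerine.foldl (fun d i =>
      let d := if d.contains i then d else d.insert i 0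
      d.insert i (d.getD i 0 + 1)) PySem.Dict.empty
  let values := PySem.List.sorted (PySem.Dict.values typeDic) (fun x => x) true
  solLoopA values k answer

-- ===== PORT B =====
-- 'for _ in range(m): if k <= 0: return answer; answer += 1; k -= c'
-- .inl = early return, .inr = state (k, answer) after the inner loop
def solLoopBInner (c : Int) : Nat → Int → Int → Sum Int (Int × Int)
  | 0, k, answer => .inr (k, answer)
  | m + 1, k, answer =>
    if k ≤ 0 then .inl answer else solLoopBInner c m (k - c) (answer + 1)

def solLoopBOuter (bucket : PySem.Dict Int Int) : List Int → Int → Int → Int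
  | [], _, answer => answer
  | c :: rest, k, answer =>
    match solLoopBInner c (bucket.getD c 0).toNat k answer with
    | .inl a => a
    | .inr (k', answer') => solLoopBOuter bucket rest k' answer'

def solution_alt (k : Int) (tangerine : List Int) : Int :=
  let freq : PySem.Dict Int Int :=
    tangerine.foldl (fun d t => d.insert t (d.getD t 0 + 1)) PySem.Dict.empty
  let bucket : PySem.Dict Int Int :=
    (PySem.Dict.values freq).foldl (fun d c => d.insert c (d.getD c 0 + 1)) PySem.Dict.empty
  solLoopBOuter bucket (PySem.List.pyRange (tangerine.length : Int) 0 (-1)) k 0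

-- ===== PRECONDITION & SPEC =====
def Spec_solution (k : Int) (tangerine : List Int) (out : Int) : Prop := out = solution_alt k tangerine
instance (k : Int) (tangerine : List Int) (out : Int) : Decidable (Spec_solution k tangerine out) := by unfold Spec_solution; infer_instance

-- ===== CLAIM (what is proved, stated in full; the proofs are below) =====
def Claim_equal_solution : Prop := ∀ (k : Int) (tangerine : List Int), Dom_solution k tangerine → Spec_solution k tangerine (solution k tangerine)

-- ===== LEMMAS AND PROOFS =====

theorem solLoopA_replicate_append (c : Int) (m : Nat) (rest : List Int) (k answer : Int) :
    solLoopA (List.replicate m c ++ rest) k answer =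
      match solLoopBInner c m k answer with
      | .inl a => a
      | .inr (k', answer') => solLoopA rest k' answer' := by
  induction m generalizing k answer with
  | zero => simp [solLoopBInner]
  | succ m ih =>
    simp only [List.replicate_succ, List.cons_append, solLoopA, solLoopBInner]
    split_ifs with h
    · rfl
    · exact ih _ _

theorem solLoopBOuter_eq_solLoopA (bucket : PySem.Dict Int Int) (cs : List Int) (k answer : Int) :
    solLoopBOuter bucket cs k answer =
      solLoopA (cs.flatMap (fun c => List.replicate (bucket.getD c 0).toNat c)) k answer := by
  induction cs generalizing k answer with
  | nil => rfl
  | cons c rest ih =>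
    simp only [solLoopBOuter, List.flatMap_cons, solLoopA_replicate_append]
    cases solLoopBInner c (bucket.getD c 0).toNat k answer with
    | inl a => rfl
    | inr p => exact ih _ _

theorem count_flatMap_replicate (cs : List Int) (m : Int → Nat) (x : Int) (hnd : cs.Nodup) :
    (cs.flatMap (fun c => List.replicate (m c) c)).count x = if x ∈ cs then m x else 0 := by
  induction cs with
  | nil => simp
  | cons c rest ih =>
    simp only [List.nodup_cons] at hnd
    simp only [List.flatMap_cons, List.count_append, List.count_replicate, ih hnd.2,
      List.mem_cons]
    by_cases hx : x = c
    · subst hx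
      simp [hnd.1]
    · simp [hx, Ne.symm hx]

-- strictly decreasing heads give a ≥-sorted flatMap of replicates
theorem pairwise_flatMap_replicate (cs : List Int) (m : Int → Nat)
    (hgt : cs.Pairwise (fun a b => b < a)) :
    (cs.flatMap (fun c => List.replicate (m c) c)).Pairwise (fun a b => b ≤ a) := by
  induction cs with
  | nil => simp
  | cons c rest ih =>
    rw [List.pairwise_cons] at hgt
    simp only [List.flatMap_cons]
    refine List.pairwise_append.2 ⟨?_, ih hgt.2, ?_⟩
    · exact List.pairwise_replicate.2 (Or.inr le_rfl)
    · intro a ha b hb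
      rcases List.eq_of_mem_replicate ha with rfl
      rcases List.mem_flatMap.1 hb with ⟨c', hc', hb'⟩
      exact (List.eq_of_mem_replicate hb') ▸ (hgt.1 c' hc').le

-- any list of values in [1, n] sorted descendingly is the countdown of its replicated counts
theorem sorted_rev_eq_flatMap (vals : List Int) (n : Int)
    (hmem : ∀ v ∈ vals, 1 ≤ v ∧ v ≤ n) :
    PySem.List.sorted vals (fun x => x) true =
      (PySem.List.pyRange n 0 (-1)).flatMap (fun c => List.replicate (vals.count c) c) := by
  have hndrange : (PySem.List.pyRange n 0 (-1)).Nodup := by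
    rw [PySem.List.pyRange_neg_one_eq_reverse]
    exact List.nodup_reverse.2 (PySem.List.nodup_pyRange_one _ _)
  have hgt : (PySem.List.pyRange n 0 (-1)).Pairwise (fun a b => b < a) := by
    rw [PySem.List.pyRange_neg_one_eq_reverse, List.pairwise_reverse]
    exact PySem.List.pairwise_lt_pyRange_one _ _
  -- the flatMap is pairwise ≥
  have hpair : ((PySem.List.pyRange n 0 (-1)).flatMap
      (fun c => List.replicate (vals.count c) c)).Pairwise (fun a b => b ≤ a) :=
    pairwise_flatMap_replicate _ _ hgt
  -- the flatMap is a permutation of vals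
  have hperm : ((PySem.List.pyRange n 0 (-1)).flatMap
      (fun c => List.replicate (vals.count c) c)).Perm vals := by
    rw [List.perm_iff_count]
    intro x
    rw [count_flatMap_replicate _ _ _ hndrange]
    by_cases hx : x ∈ PySem.List.pyRange n 0 (-1)
    · simp [hx]
    · rw [PySem.List.mem_pyRange_neg_one] at hx
      have hxn : x ∉ vals := fun hmemx => hx ⟨by have := (hmem x hmemx).1; omega, (hmem x hmemx).2⟩
      simp [hx, List.count_eq_zero.2 hxn]
  -- both sides reversed are ≤-pairwise permutations of each other — hence equal
  have h1 : (PySem.List.sorted vals (fun x => x) true).reverse.Pairwise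
      (fun a b : Int => (fun x : Int => x) a ≤ (fun x : Int => x) b) := by
    rw [List.pairwise_reverse]
    exact PySem.List.sorted_pairwise_rev vals (fun x => x)
  have h2 : ((PySem.List.pyRange n 0 (-1)).flatMap
      (fun c => List.replicate (vals.count c) c)).reverse.Pairwise
      (fun a b : Int => (fun x : Int => x) a ≤ (fun x : Int => x) b) := by
    rw [List.pairwise_reverse]
    exact hpair
  have hp : (PySem.List.sorted vals (fun x => x) true).reverse.Perm
      ((PySem.List.pyRange n 0 (-1)).flatMap
        (fun c => List.replicate (vals.count c) c)).reverse :=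
    ((List.reverse_perm _).trans
      (((PySem.List.sorted_perm vals (fun x => x) true).trans hperm.symm).trans
        (List.reverse_perm _).symm))
  have heq := PySem.List.eq_of_perm_of_pairwise_le_of_injective
    (fun x : Int => x) (fun a b h => h) hp h1 h2
  exact List.reverse_inj.1 heq

-- A's guarded counting step is the plain counting step of B
theorem stepA_eq_stepB :
    (fun (d : PySem.Dict Int Int) i =>
      let d := if d.contains i then d else d.insert i 0
      d.insert i (d.getD i 0 + 1)) =
    (fun (d : PySem.Dict Int Int) t => d.insert t (d.getD t 0 + 1)) := by
  funext d i
  by_cases h : d.contains i = true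
  · simp [h]
  · rw [Bool.not_eq_true] at h
    simp [h, PySem.Dict.getD_insert_self, PySem.Dict.insert_insert_self,
      PySem.Dict.getD_of_not_contains]

-- the values list of Counter(tangerine)
theorem values_counter_eq (tangerine : List Int) :
    PySem.Dict.values (PySem.Dict.counter tangerine) =
      (PySem.Set.ofList tangerine).map (fun x => ((tangerine.count x : Nat) : Int)) := by
  show (PySem.Dict.counter tangerine).items.map (·.2) = _
  rw [PySem.Dict.items_counter, List.map_map]
  simp [Function.comp]

-- ===== VERDICT (by name: the statement is the Claim_ definition above) =====
theorem solution_spec : Claim_equal_solution := by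
  intro k tangerine _
  show solution k tangerine = solution_alt k tangerine
  simp only [solution, solution_alt]
  rw [stepA_eq_stepB, PySem.Dict.foldl_insert_getD_add_one_eq_counter, values_counter_eq]
  set vals := (PySem.Set.ofList tangerine).map (fun x => ((tangerine.count x : Nat) : Int)) with hv
  set bucket : PySem.Dict Int Int := vals.foldl (fun d c => d.insert c (d.getD c 0 + 1)) PySem.Dict.empty with hb
  have hbucket : ∀ c : Int, (bucket.getD c 0).toNat = vals.count c := by
    intro c
    rw [hb, PySem.Dict.getD_foldl_insert_add_one]
    simp
  have hmem : ∀ v ∈ vals, 1 ≤ v ∧ v ≤ (tangerine.length : Int) := by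
    intro v hvv
    rcases List.mem_map.1 hvv with ⟨x, hx, rfl⟩
    have hxmem : x ∈ tangerine := (PySem.Set.mem_ofList _ _).1 hx
    constructor
    · exact_mod_cast List.count_pos_iff.2 hxmem
    · exact_mod_cast List.count_le_length
  rw [solLoopBOuter_eq_solLoopA,
    sorted_rev_eq_flatMap vals (tangerine.length : Int) hmem]
  congr 1
  simp only [hbucket]
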